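-- pv_equiv track=rewrite | github.com/miliar/Code_Jam_Webscraper | solutions_python/solutions_year15_round0_nr1/2180.py | solve
-- ===== SOURCE A (Python) =====
-- def solve(audience):
-- 	standing = 0
-- 	extra = 0
-- 	for shyness, num in enumerate(audience):
-- 		if int(num) > 0 and shyness > standing:
-- 			extra += shyness - standing
-- 			standing = shyness
-- 		standing += int(num)
-- 	return extra
-- ===== SOURCE B (Python) =====
-- def solve(audience):
-- 	prefixes = []
-- 	total = 0
-- 	for num in audience:
-- 		prefixes.append(total)
-- 		total += int(num)
-- 	deficits = [i - p for i, (p, num) in enumerate(zip(prefixes, audience)) if int(num) > 0]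
-- 	return max([0] + deficits)
-- ===== Notes on version B (the rewrite author's own statement) =====
-- stated objective: alternative
-- what changed: Replaces A's single stateful loop (a 'standing' accumulator that jumps up to the shyness index while adding 'extra') by staged passes: first build the pure prefix-sum list, then a comprehension of deficits (index minus prefix sum) over the positive groups, then one max over them.
import Mathlib
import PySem

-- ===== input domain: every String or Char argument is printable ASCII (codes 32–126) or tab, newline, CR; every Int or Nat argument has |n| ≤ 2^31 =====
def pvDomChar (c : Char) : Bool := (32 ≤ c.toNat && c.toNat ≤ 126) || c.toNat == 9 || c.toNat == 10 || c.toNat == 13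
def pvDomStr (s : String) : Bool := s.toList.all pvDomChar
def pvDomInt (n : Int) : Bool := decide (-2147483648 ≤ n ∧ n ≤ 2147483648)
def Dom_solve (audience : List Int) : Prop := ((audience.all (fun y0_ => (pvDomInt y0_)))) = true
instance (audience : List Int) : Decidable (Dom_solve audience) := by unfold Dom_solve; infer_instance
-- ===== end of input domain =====

-- B replaces A's stateful jumping accumulator by staged passes: prefix sums, a deficit comprehension, then a max (alternative decomposition, same cost).


-- ===== PORT A =====
def solve (audience : List Int) : Int :=
  ((PySem.List.enumerate audience).foldl
    (fun (st : Int × Int) (p : Int × Int) =>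
      let standing := st.1
      let extra := st.2
      let se :=
        if p.2 > 0 ∧ p.1 > standing then (p.1, extra + (p.1 - standing))
        else (standing, extra)
      (se.1 + p.2, se.2))
    (0, 0)).2

-- ===== PORT B =====
-- Pass 1: the loop appending `total` to `prefixes` then adding the element.
-- Pass 2: the deficit comprehension over enumerate(zip(prefixes, audience)).
-- Pass 3: Python's max([0] + deficits) = fold of max over the list with 0 in front.
def solve_alt (audience : List Int) : Int :=
  let pr := audience.foldl
    (fun (st : List Int × Int) num => (st.1 ++ [st.2], st.2 + num))
    (([] : List Int), 0)
  let deficits := (PySem.List.enumerate (List.zip pr.1 audience)).filterMap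
    (fun q => if q.2.2 > 0 then some (q.1 - q.2.1) else none)
  (([0] : List Int) ++ deficits).foldl max 0

-- ===== PRECONDITION & SPEC =====
def Spec_solve (audience : List Int) (out : Int) : Prop := out = solve_alt audience
instance (audience : List Int) (out : Int) : Decidable (Spec_solve audience out) := by unfold Spec_solve; infer_instance

-- ===== CLAIM =====
def Claim_equal_solve : Prop := ∀ (audience : List Int), Dom_solve audience → Spec_solve audience (solve audience)

-- ===== LEMMAS AND PROOFS =====

-- Recursive description of the prefix-sum list built by B's first pass.
def prefixList (base : Int) : List Int → List Int
  | [] => []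
  | x :: xs => base :: prefixList (base + x) xs

theorem prefixFold_eq : ∀ (xs : List Int) (acc : List Int) (base : Int),
    xs.foldl (fun (st : List Int × Int) num => (st.1 ++ [st.2], st.2 + num)) (acc, base)
      = (acc ++ prefixList base xs, base + xs.sum) := by
  intro xs
  induction xs with
  | nil => intro acc base; simp [prefixList]
  | cons x xs ih =>
    intro acc base
    simp only [List.foldl_cons, ih, prefixList, List.sum_cons]
    refine Prod.ext ?_ (by ring)
    simp

-- A's stateful loop equals a max-fold of deficits over the pure prefix sums,
-- provided standing = base + extra (invariant linking A's state to the prefix sum).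
theorem solve_loop_eq : ∀ (xs : List Int) (s standing extra base : Int),
    standing = base + extra →
    ((PySem.List.enumerate xs s).foldl
      (fun (st : Int × Int) (p : Int × Int) =>
        let standing := st.1
        let extra := st.2
        let se :=
          if p.2 > 0 ∧ p.1 > standing then (p.1, extra + (p.1 - standing))
          else (standing, extra)
        (se.1 + p.2, se.2))
      (standing, extra)).2
    = ((PySem.List.enumerate (List.zip (prefixList base xs) xs) s).filterMap
        (fun q => if q.2.2 > 0 then some (q.1 - q.2.1) else none)).foldl max extra := by
  intro xs
  induction xs with
  | nil => intro s standing extra base h; simp [prefixList, PySem.List.enumerate_nil]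
  | cons x xs ih =>
    intro s standing extra base h
    simp only [prefixList, List.zip_cons_cons, PySem.List.enumerate_cons, List.foldl_cons,
      List.filterMap_cons]
    by_cases hx : x > 0
    · rw [if_pos hx]
      simp only [List.foldl_cons]
      by_cases hs : s > standing
      · rw [if_pos (⟨hx, hs⟩ : x > 0 ∧ s > standing)]
        rw [ih (s + 1) (s + x) (extra + (s - standing)) (base + x) (by omega)]
        congr 1
        omega
      · rw [if_neg (fun hc => hs hc.2)]
        rw [ih (s + 1) (standing + x) extra (base + x) (by omega)]
        congr 1
        omega
    · rw [if_neg hx, if_neg (fun hc => hx hc.1)]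
      exact ih (s + 1) (standing + x) extra (base + x) (by omega)

-- ===== VERDICT =====
theorem solve_spec : Claim_equal_solve := by
  intro audience _
  unfold Spec_solve solve solve_alt
  rw [prefixFold_eq audience [] 0]
  simp only [List.nil_append, List.cons_append, List.foldl_cons, max_self]
  exact solve_loop_eq audience 0 0 0 0 (by ring)
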